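-- pv_equiv track=rewrite | github.com/Agentic-Environmental-Engineering/GymVerse | gem/gem/envs/RLVE/subsequence_reversal_lnds_env.py | _compute_reference_answer
-- ===== SOURCE A (Python) =====
-- from typing import Any, List, Optional, SupportsFloat, Tuple
--
-- def _compute_reference_answer(arr: List[int]) -> int:
--     """Compute the maximum achievable LNDS length after reversing a subsequence."""
--     N = len(arr)
--
--     # Use 1-indexed array with a leading zero
--     A = [0] + arr
--     M = max(A)
--
--     # dp[l][r][L][R]: max LIS length in A[l..r] after reversing at most one subsequence,
--     # considering only values in [L..R]
--     dp = [[[[0] * (M + 2) for _ in range(M + 2)] for _ in range(N + 2)] for _ in range(N + 2)]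
--
--     # Base case: intervals of length 1
--     for i in range(1, N + 1):
--         for L in range(1, A[i] + 1):
--             for R in range(A[i], M + 1):
--                 dp[i][i][L][R] = 1
--
--     # Build up for intervals of length = 2..N
--     for length in range(2, N + 1):
--         for l in range(1, N - length + 2):
--             r = l + length - 1
--             for span in range(1, M + 1):
--                 for L in range(1, M - span + 2):
--                     R = L + span - 1
--
--                     # 1) shrink the allowed value range
--                     val = dp[l][r][L + 1][R]
--                     if dp[l][r][L][R - 1] > val:
--                         val = dp[l][r][L][R - 1]
--
--                     # 2) extend by taking A[l] at the left (if it matches L)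
--                     tmp = dp[l + 1][r][L][R] + (1 if A[l] == L else 0)
--                     if tmp > val:
--                         val = tmp
--
--                     # 3) extend by taking A[r] at the right (if it matches R)
--                     tmp = dp[l][r - 1][L][R] + (1 if A[r] == R else 0)
--                     if tmp > val:
--                         val = tmp
--
--                     # 4) reverse a subsequence spanning the ends
--                     tmp = dp[l + 1][r - 1][L][R]
--                     if A[l] == R:
--                         tmp += 1
--                     if A[r] == L:
--                         tmp += 1
--                     if tmp > val:
--                         val = tmp
--
--                     dp[l][r][L][R] = val
--
--     # The answer is dp[1][N][1][M]
--     return dp[1][N][1][M]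
-- ===== SOURCE B (Python) =====
-- def _compute_reference_answer(arr):
--     """Max LNDS length after reversing one subsequence, via top-down memoized
--     recursion over (l, r, L, R) instead of A's full bottom-up 4-D table."""
--     N = len(arr)
--     A = [0] + arr
--     M = max(A)
--     cache = {}
--
--     def solve(l, r, L, R):
--         if l > r or L > R:
--             return 0
--         key = (l, r, L, R)
--         v = cache.get(key)
--         if v is not None:
--             return v
--         if l == r:
--             v = 1 if L <= A[l] <= R else 0
--         else:
--             v = max(solve(l, r, L + 1, R), solve(l, r, L, R - 1),
--                     solve(l + 1, r, L, R) + (1 if A[l] == L else 0),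
--                     solve(l, r - 1, L, R) + (1 if A[r] == R else 0),
--                     solve(l + 1, r - 1, L, R)
--                     + (1 if A[l] == R else 0) + (1 if A[r] == L else 0))
--         cache[key] = v
--         return v
--
--     return solve(1, N, 1, M)
-- ===== Notes on version B (the rewrite author's own statement) =====
-- stated objective: alternative
-- what changed: Replaces A's bottom-up tabulation over the full (N+2)x(N+2)x(M+2)x(M+2) table (allocated and filled cell by cell in four nested loops) with top-down memoized recursion solve(l,r,L,R) that only evaluates states reachable from (1,N,1,M) and stores them in a dict.
import Mathlib
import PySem

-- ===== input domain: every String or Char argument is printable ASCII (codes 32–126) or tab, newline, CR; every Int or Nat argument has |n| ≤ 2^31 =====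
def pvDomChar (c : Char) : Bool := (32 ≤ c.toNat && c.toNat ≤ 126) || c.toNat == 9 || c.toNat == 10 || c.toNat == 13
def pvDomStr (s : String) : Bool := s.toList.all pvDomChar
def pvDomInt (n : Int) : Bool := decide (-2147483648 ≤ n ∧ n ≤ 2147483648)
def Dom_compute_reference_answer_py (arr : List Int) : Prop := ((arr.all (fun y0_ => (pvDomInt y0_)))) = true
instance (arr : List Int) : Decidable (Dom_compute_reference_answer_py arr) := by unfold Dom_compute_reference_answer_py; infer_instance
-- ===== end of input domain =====

-- B replaces A's full bottom-up 4-D tabulation by top-down memoized recursion over (l, r, L, R) (objective: alternative; return value only, no mutation involved).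

-- ===== PORT A =====
-- Python 4-D list read dp[i][j][k][m] / write dp[i][j][k][m] = v (indices are nonnegative and
-- in range at every use in A, where these are exact; lists of ints ported as Arrays).
def pvAGet {α : Type} [Inhabited α] (a : Array α) (i : Int) : α := (a[i.toNat]?).getD default

def pvASet {α : Type} (a : Array α) (i : Int) (v : α) : Array α := a.setIfInBounds i.toNat v

def pvGet4 (dp : Array (Array (Array (Array Int)))) (i j k m : Int) : Int :=
  pvAGet (pvAGet (pvAGet (pvAGet dp i) j) k) m

def pvSet4 (dp : Array (Array (Array (Array Int)))) (i j k m : Int) (v : Int) :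
    Array (Array (Array (Array Int))) :=
  pvASet dp i (pvASet (pvAGet dp i) j (pvASet (pvAGet (pvAGet dp i) j) k
    (pvASet (pvAGet (pvAGet (pvAGet dp i) j) k) m v)))

def compute_reference_answer_py (arr : List Int) : Int :=
  let N : Int := arr.length
  let A : List Int := 0 :: arr
  let M : Int := (PySem.List.max? A (fun x => x)).getD 0
  -- dp = [[[[0]*(M+2) for _ in range(M+2)] for _ in range(N+2)] for _ in range(N+2)]
  let dp0 : Array (Array (Array (Array Int))) :=
    Array.replicate (N + 2).toNat (Array.replicate (N + 2).toNat
      (Array.replicate (M + 2).toNat (Array.replicate (M + 2).toNat (0 : Int))))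
  -- base case: intervals of length 1
  let dp1 := (PySem.List.pyRange 1 (N + 1) 1).foldl (fun dp i =>
    (PySem.List.pyRange 1 (PySem.List.pyGetD A i 0 + 1) 1).foldl (fun dp L =>
      (PySem.List.pyRange (PySem.List.pyGetD A i 0) (M + 1) 1).foldl (fun dp R =>
        pvSet4 dp i i L R 1) dp) dp) dp0
  -- build up for intervals of length 2..N
  let dp2 := (PySem.List.pyRange 2 (N + 1) 1).foldl (fun dp length =>
    (PySem.List.pyRange 1 (N - length + 2) 1).foldl (fun dp l =>
      let r := l + length - 1
      (PySem.List.pyRange 1 (M + 1) 1).foldl (fun dp span =>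
        (PySem.List.pyRange 1 (M - span + 2) 1).foldl (fun dp L =>
          let R := L + span - 1
          let val := pvGet4 dp l r (L + 1) R
          let val := if pvGet4 dp l r L (R - 1) > val then pvGet4 dp l r L (R - 1) else val
          let tmp := pvGet4 dp (l + 1) r L R + (if PySem.List.pyGetD A l 0 = L then 1 else 0)
          let val := if tmp > val then tmp else val
          let tmp := pvGet4 dp l (r - 1) L R + (if PySem.List.pyGetD A r 0 = R then 1 else 0)
          let val := if tmp > val then tmp else val
          let tmp := pvGet4 dp (l + 1) (r - 1) L R
          let tmp := tmp + (if PySem.List.pyGetD A l 0 = R then 1 else 0)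
          let tmp := tmp + (if PySem.List.pyGetD A r 0 = L then 1 else 0)
          let val := if tmp > val then tmp else val
          pvSet4 dp l r L R val) dp) dp) dp) dp1
  pvGet4 dp2 1 N 1 M

-- ===== PORT B =====
-- Source B's `solve` with its cache dict; the threaded HashMap is Source B's `cache`.
-- `fuel` is a totality guard only (structural recursion; each call strictly shrinks
-- (r-l)+(R-L), and the top-level call supplies enough fuel, so fuel never runs out).
def pvSolve (A : List Int) (fuel : Nat) (l r L R : Int)
    (cache : Std.HashMap (Int × Int × Int × Int) Int) :
    Int × Std.HashMap (Int × Int × Int × Int) Int :=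
  if l > r ∨ L > R then (0, cache)
  else match fuel with
  | 0 => (0, cache)   -- unreachable with sufficient fuel
  | fuel + 1 =>
    match cache[(l, r, L, R)]? with
    | some v => (v, cache)
    | none =>
      if l = r then
        let a := PySem.List.pyGetD A l 0
        let v : Int := if L ≤ a ∧ a ≤ R then 1 else 0
        (v, cache.insert (l, r, L, R) v)
      else
        let p1 := pvSolve A fuel l r (L + 1) R cache
        let p2 := pvSolve A fuel l r L (R - 1) p1.2
        let p3 := pvSolve A fuel (l + 1) r L R p2.2
        let p4 := pvSolve A fuel l (r - 1) L R p3.2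
        let p5 := pvSolve A fuel (l + 1) (r - 1) L R p4.2
        let v := max (max (max (max p1.1 p2.1)
            (p3.1 + (if PySem.List.pyGetD A l 0 = L then 1 else 0)))
            (p4.1 + (if PySem.List.pyGetD A r 0 = R then 1 else 0)))
            (p5.1 + (if PySem.List.pyGetD A l 0 = R then 1 else 0)
                  + (if PySem.List.pyGetD A r 0 = L then 1 else 0))
        (v, p5.2.insert (l, r, L, R) v)

def compute_reference_answer_py_alt (arr : List Int) : Int :=
  let N : Int := arr.length
  let A : List Int := 0 :: arr
  let M : Int := (PySem.List.max? A (fun x => x)).getD 0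
  (pvSolve A (((N - 1) + (M - 1)).toNat + 1) 1 N 1 M
    (∅ : Std.HashMap (Int × Int × Int × Int) Int)).1

-- ===== PRECONDITION & SPEC =====
-- No Pre_: A returns on every list of ints, and B matches it everywhere.

def Spec_compute_reference_answer_py (arr : List Int) (out : Int) : Prop :=
  out = compute_reference_answer_py_alt arr
instance (arr : List Int) (out : Int) : Decidable (Spec_compute_reference_answer_py arr out) := by
  unfold Spec_compute_reference_answer_py; infer_instance

-- ===== CLAIM (what is proved, stated in full; the proofs are below) =====
def Claim_equal_compute_reference_answer_py : Prop := ∀ (arr : List Int), Dom_compute_reference_answer_py arr → Spec_compute_reference_answer_py arr (compute_reference_answer_py arr)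

-- ===== LEMMAS AND PROOFS =====

-- The shared mathematical recursion both ports compute: max LNDS length in A[l..r]
-- (1-indexed) using values in [L..R], after reversing at most one subsequence.
def pvLNDS (A : List Int) (l r L R : Int) : Int :=
  if l > r ∨ L > R then 0
  else if l = r then
    (if L ≤ PySem.List.pyGetD A l 0 ∧ PySem.List.pyGetD A l 0 ≤ R then 1 else 0)
  else
    max (max (max (max (pvLNDS A l r (L + 1) R) (pvLNDS A l r L (R - 1)))
        (pvLNDS A (l + 1) r L R + (if PySem.List.pyGetD A l 0 = L then 1 else 0)))
        (pvLNDS A l (r - 1) L R + (if PySem.List.pyGetD A r 0 = R then 1 else 0)))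
        (pvLNDS A (l + 1) (r - 1) L R + (if PySem.List.pyGetD A l 0 = R then 1 else 0)
              + (if PySem.List.pyGetD A r 0 = L then 1 else 0))
termination_by ((r - l) + (R - L)).toNat
decreasing_by all_goals omega

theorem pvLNDS_zero (A : List Int) (l r L R : Int) (h : l > r ∨ L > R) :
    pvLNDS A l r L R = 0 := by
  rw [pvLNDS, if_pos h]

theorem pvLNDS_base (A : List Int) (l r L R : Int) (h : ¬(l > r ∨ L > R)) (he : l = r) :
    pvLNDS A l r L R =
      (if L ≤ PySem.List.pyGetD A l 0 ∧ PySem.List.pyGetD A l 0 ≤ R then 1 else 0) := by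
  rw [pvLNDS, if_neg h, if_pos he]

theorem pvLNDS_step (A : List Int) (l r L R : Int) (h : ¬(l > r ∨ L > R)) (hne : ¬ l = r) :
    pvLNDS A l r L R =
      max (max (max (max (pvLNDS A l r (L + 1) R) (pvLNDS A l r L (R - 1)))
        (pvLNDS A (l + 1) r L R + (if PySem.List.pyGetD A l 0 = L then 1 else 0)))
        (pvLNDS A l (r - 1) L R + (if PySem.List.pyGetD A r 0 = R then 1 else 0)))
        (pvLNDS A (l + 1) (r - 1) L R + (if PySem.List.pyGetD A l 0 = R then 1 else 0)
              + (if PySem.List.pyGetD A r 0 = L then 1 else 0)) := by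
  rw [pvLNDS, if_neg h, if_neg hne]

theorem pvChainMax (x1 x2 x3 x4 x5 : Int) :
    (let val := x1;
     let val := if x2 > val then x2 else val;
     let tmp := x3;
     let val := if tmp > val then tmp else val;
     let tmp := x4;
     let val := if tmp > val then tmp else val;
     let tmp := x5;
     if tmp > val then tmp else val) = max (max (max (max x1 x2) x3) x4) x5 := by
  simp only [Int.max_def]
  split_ifs <;> omega

-- ---- the 4-D table: dimensions, reads after writes ----

theorem pvAGet_congr {α : Type} [Inhabited α] (a : Array α) {i j : Int} (h : i.toNat = j.toNat) :
    pvAGet a i = pvAGet a j := by unfold pvAGet; rw [h]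

theorem pvAGet_replicate {α : Type} [Inhabited α] (n : Nat) (x : α) (i : Int) (h : i.toNat < n) :
    pvAGet (Array.replicate n x) i = x := by
  unfold pvAGet; rw [Array.getElem?_replicate, if_pos h]; rfl

theorem pvAGet_oob {α : Type} [Inhabited α] (a : Array α) (i : Int) (h : a.size ≤ i.toNat) :
    pvAGet a i = default := by
  unfold pvAGet; rw [Array.getElem?_eq_none h]; rfl

theorem pvAGet_default {α : Type} [Inhabited α] (i : Int) :
    pvAGet (default : Array α) i = default := by
  unfold pvAGet
  simp [show (default : Array α) = #[] from rfl]

theorem size_pvASet {α : Type} (a : Array α) (i : Int) (v : α) :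
    (pvASet a i v).size = a.size := Array.size_setIfInBounds

theorem pvAGet_pvASet_self {α : Type} [Inhabited α] (a : Array α) {i i' : Int} (v : α)
    (hn : i'.toNat = i.toNat) (h : i.toNat < a.size) : pvAGet (pvASet a i v) i' = v := by
  unfold pvAGet pvASet; rw [hn, Array.getElem?_setIfInBounds, if_pos rfl, if_pos h]; rfl

theorem pvAGet_pvASet_ne {α : Type} [Inhabited α] (a : Array α) {i i' : Int} (v : α)
    (hn : i'.toNat ≠ i.toNat) : pvAGet (pvASet a i v) i' = pvAGet a i' := by
  unfold pvAGet pvASet; rw [Array.getElem?_setIfInBounds, if_neg (fun hh => hn hh.symm)]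

def pvDims (n m : Nat) (dp : Array (Array (Array (Array Int)))) : Prop :=
  dp.size = n ∧ ∀ i : Int, i.toNat < n → (pvAGet dp i).size = n ∧
    ∀ j : Int, j.toNat < n → (pvAGet (pvAGet dp i) j).size = m ∧
      ∀ k : Int, k.toNat < m → (pvAGet (pvAGet (pvAGet dp i) j) k).size = m

theorem pvDims_size1 {n m : Nat} {dp : Array (Array (Array (Array Int)))}
    (hd : pvDims n m dp) (i : Int) (hi : i.toNat < n) : (pvAGet dp i).size = n :=
  (hd.2 i hi).1

theorem pvDims_size2 {n m : Nat} {dp : Array (Array (Array (Array Int)))}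
    (hd : pvDims n m dp) (i j : Int) (hi : i.toNat < n) (hj : j.toNat < n) :
    (pvAGet (pvAGet dp i) j).size = m :=
  (((hd.2 i hi).2) j hj).1

theorem pvDims_size3 {n m : Nat} {dp : Array (Array (Array (Array Int)))}
    (hd : pvDims n m dp) (i j k : Int) (hi : i.toNat < n) (hj : j.toNat < n) (hk : k.toNat < m) :
    (pvAGet (pvAGet (pvAGet dp i) j) k).size = m :=
  ((((hd.2 i hi).2) j hj).2) k hk

theorem pvDims_init (n m : Nat) :
    pvDims n m (Array.replicate n (Array.replicate n (Array.replicate m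
      (Array.replicate m (0 : Int))))) := by
  refine ⟨by simp, fun i hi => ?_⟩
  rw [pvAGet_replicate _ _ _ hi]
  refine ⟨by simp, fun j hj => ?_⟩
  rw [pvAGet_replicate _ _ _ hj]
  refine ⟨by simp, fun k hk => ?_⟩
  rw [pvAGet_replicate _ _ _ hk]
  simp

theorem pvGet4_init (n m : Nat) (i j k l : Int) :
    pvGet4 (Array.replicate n (Array.replicate n (Array.replicate m
      (Array.replicate m (0 : Int))))) i j k l = 0 := by
  unfold pvGet4
  by_cases h1 : i.toNat < n
  · rw [pvAGet_replicate _ _ _ h1]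
    by_cases h2 : j.toNat < n
    · rw [pvAGet_replicate _ _ _ h2]
      by_cases h3 : k.toNat < m
      · rw [pvAGet_replicate _ _ _ h3]
        by_cases h4 : l.toNat < m
        · rw [pvAGet_replicate _ _ _ h4]
        · rw [pvAGet_oob (Array.replicate m (0 : Int)) l (by simp; omega)]; rfl
      · rw [pvAGet_oob (Array.replicate m (Array.replicate m (0 : Int))) k (by simp; omega),
          pvAGet_default]; rfl
    · rw [pvAGet_oob (Array.replicate n (Array.replicate m (Array.replicate m (0 : Int)))) j
        (by simp; omega), pvAGet_default, pvAGet_default]; rfl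
  · rw [pvAGet_oob (Array.replicate n (Array.replicate n (Array.replicate m
      (Array.replicate m (0 : Int))))) i (by simp; omega),
      pvAGet_default, pvAGet_default, pvAGet_default]; rfl

theorem pvDims_pvSet4 {n m : Nat} {dp : Array (Array (Array (Array Int)))}
    (hd : pvDims n m dp) (i j k l : Int) (v : Int)
    (hi : i.toNat < n) (hj : j.toNat < n) (hk : k.toNat < m) (hl : l.toNat < m) :
    pvDims n m (pvSet4 dp i j k l v) := by
  have hs0 := hd.1
  have hs1 := pvDims_size1 hd i hi
  have hs2 := pvDims_size2 hd i j hi hj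
  have hs3 := pvDims_size3 hd i j k hi hj hk
  refine ⟨by rw [pvSet4, size_pvASet, hs0], fun i' hi' => ?_⟩
  by_cases hii : i'.toNat = i.toNat
  · have e1 : pvAGet (pvSet4 dp i j k l v) i' =
        pvASet (pvAGet dp i) j (pvASet (pvAGet (pvAGet dp i) j) k
          (pvASet (pvAGet (pvAGet (pvAGet dp i) j) k) l v)) := by
      rw [pvSet4]; exact pvAGet_pvASet_self _ _ hii (hs0 ▸ hi)
    rw [e1]
    refine ⟨by rw [size_pvASet, hs1], fun j' hj' => ?_⟩
    by_cases hjj : j'.toNat = j.toNat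
    · have e2 : pvAGet (pvASet (pvAGet dp i) j (pvASet (pvAGet (pvAGet dp i) j) k
          (pvASet (pvAGet (pvAGet (pvAGet dp i) j) k) l v))) j' =
          pvASet (pvAGet (pvAGet dp i) j) k (pvASet (pvAGet (pvAGet (pvAGet dp i) j) k) l v) :=
        pvAGet_pvASet_self _ _ hjj (hs1 ▸ hj)
      rw [e2]
      refine ⟨by rw [size_pvASet, hs2], fun k' hk' => ?_⟩
      by_cases hkk : k'.toNat = k.toNat
      · have e3 : pvAGet (pvASet (pvAGet (pvAGet dp i) j) k
            (pvASet (pvAGet (pvAGet (pvAGet dp i) j) k) l v)) k' =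
            pvASet (pvAGet (pvAGet (pvAGet dp i) j) k) l v :=
          pvAGet_pvASet_self _ _ hkk (hs2 ▸ hk)
        rw [e3, size_pvASet, hs3]
      · have e3 : pvAGet (pvASet (pvAGet (pvAGet dp i) j) k
            (pvASet (pvAGet (pvAGet (pvAGet dp i) j) k) l v)) k' =
            pvAGet (pvAGet (pvAGet dp i) j) k' :=
          pvAGet_pvASet_ne _ _ hkk
        rw [e3]
        exact (((hd.2 i hi).2) j hj).2 k' hk'
    · have e2 : pvAGet (pvASet (pvAGet dp i) j (pvASet (pvAGet (pvAGet dp i) j) k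
          (pvASet (pvAGet (pvAGet (pvAGet dp i) j) k) l v))) j' = pvAGet (pvAGet dp i) j' :=
        pvAGet_pvASet_ne _ _ hjj
      rw [e2]
      exact ((hd.2 i hi).2) j' hj'
  · have e1 : pvAGet (pvSet4 dp i j k l v) i' = pvAGet dp i' := by
      rw [pvSet4]; exact pvAGet_pvASet_ne _ _ hii
    rw [e1]
    exact hd.2 i' hi'

theorem pvGet4_pvSet4 {n m : Nat} {dp : Array (Array (Array (Array Int)))}
    (hd : pvDims n m dp) (i j k l : Int) (v : Int)
    (hi : i.toNat < n) (hj : j.toNat < n) (hk : k.toNat < m) (hl : l.toNat < m)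
    (i' j' k' l' : Int) :
    pvGet4 (pvSet4 dp i j k l v) i' j' k' l' =
      if i'.toNat = i.toNat ∧ j'.toNat = j.toNat ∧ k'.toNat = k.toNat ∧ l'.toNat = l.toNat
      then v else pvGet4 dp i' j' k' l' := by
  have hs0 := hd.1
  have hs1 := pvDims_size1 hd i hi
  have hs2 := pvDims_size2 hd i j hi hj
  have hs3 := pvDims_size3 hd i j k hi hj hk
  unfold pvGet4
  by_cases hii : i'.toNat = i.toNat
  · have e1 : pvAGet (pvSet4 dp i j k l v) i' =
        pvASet (pvAGet dp i) j (pvASet (pvAGet (pvAGet dp i) j) k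
          (pvASet (pvAGet (pvAGet (pvAGet dp i) j) k) l v)) := by
      rw [pvSet4]; exact pvAGet_pvASet_self _ _ hii (hs0 ▸ hi)
    rw [e1]
    have ei' : pvAGet dp i' = pvAGet dp i := pvAGet_congr dp hii
    by_cases hjj : j'.toNat = j.toNat
    · rw [pvAGet_pvASet_self _ _ hjj (hs1 ▸ hj)]
      have ej' : pvAGet (pvAGet dp i') j' = pvAGet (pvAGet dp i) j := by
        rw [ei']; exact pvAGet_congr _ hjj
      by_cases hkk : k'.toNat = k.toNat
      · rw [pvAGet_pvASet_self _ _ hkk (hs2 ▸ hk)]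
        have ek' : pvAGet (pvAGet (pvAGet dp i') j') k' = pvAGet (pvAGet (pvAGet dp i) j) k := by
          rw [ej']; exact pvAGet_congr _ hkk
        by_cases hll : l'.toNat = l.toNat
        · rw [pvAGet_pvASet_self _ _ hll (hs3 ▸ hl),
            if_pos (show i'.toNat = i.toNat ∧ j'.toNat = j.toNat ∧ k'.toNat = k.toNat ∧
              l'.toNat = l.toNat from ⟨hii, hjj, hkk, hll⟩)]
        · rw [pvAGet_pvASet_ne _ _ hll,
            if_neg (show ¬(i'.toNat = i.toNat ∧ j'.toNat = j.toNat ∧ k'.toNat = k.toNat ∧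
              l'.toNat = l.toNat) from fun hcon => hll hcon.2.2.2), ek']
      · rw [pvAGet_pvASet_ne _ _ hkk,
          if_neg (show ¬(i'.toNat = i.toNat ∧ j'.toNat = j.toNat ∧ k'.toNat = k.toNat ∧
            l'.toNat = l.toNat) from fun hcon => hkk hcon.2.2.1), ej']
    · rw [pvAGet_pvASet_ne _ _ hjj,
        if_neg (show ¬(i'.toNat = i.toNat ∧ j'.toNat = j.toNat ∧ k'.toNat = k.toNat ∧
          l'.toNat = l.toNat) from fun hcon => hjj hcon.2.1), ei']
  · have e1 : pvAGet (pvSet4 dp i j k l v) i' = pvAGet dp i' := by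
      rw [pvSet4]; exact pvAGet_pvASet_ne _ _ hii
    rw [e1,
      if_neg (show ¬(i'.toNat = i.toNat ∧ j'.toNat = j.toNat ∧ k'.toNat = k.toNat ∧
        l'.toNat = l.toNat) from fun hcon => hii hcon.1)]

-- ---- the invariant: what each cell of A's table holds at a given loop position ----

abbrev pvLex (c1 c2 c3 c4 p1 p2 p3 p4 : Int) : Prop :=
  c1 < p1 ∨ (c1 = p1 ∧ (c2 < p2 ∨ (c2 = p2 ∧ (c3 < p3 ∨ (c3 = p3 ∧ c4 < p4)))))

def pvT (A : List Int) (N M p1 p2 p3 p4 i j k m : Int) : Int :=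
  if 1 ≤ i ∧ i < j ∧ j ≤ N ∧ 1 ≤ k ∧ k ≤ m ∧ m ≤ M then
    (if pvLex (j - i + 1) i (m - k + 1) k p1 p2 p3 p4 then pvLNDS A i j k m else 0)
  else if i = j ∧ 1 ≤ i ∧ i ≤ N ∧ 1 ≤ k ∧ k ≤ PySem.List.pyGetD A i 0 ∧
      PySem.List.pyGetD A i 0 ≤ m ∧ m ≤ M then 1 else 0

theorem pvT_main {A : List Int} {N M p1 p2 p3 p4 i j k m : Int}
    (hb : 1 ≤ i ∧ i < j ∧ j ≤ N ∧ 1 ≤ k ∧ k ≤ m ∧ m ≤ M)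
    (hlex : pvLex (j - i + 1) i (m - k + 1) k p1 p2 p3 p4) :
    pvT A N M p1 p2 p3 p4 i j k m = pvLNDS A i j k m := by
  unfold pvT; rw [if_pos hb, if_pos hlex]

theorem pvT_main0 {A : List Int} {N M p1 p2 p3 p4 i j k m : Int}
    (hb : 1 ≤ i ∧ i < j ∧ j ≤ N ∧ 1 ≤ k ∧ k ≤ m ∧ m ≤ M)
    (hlex : ¬ pvLex (j - i + 1) i (m - k + 1) k p1 p2 p3 p4) :
    pvT A N M p1 p2 p3 p4 i j k m = 0 := by
  unfold pvT; rw [if_pos hb, if_neg hlex]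

theorem pvT_base {A : List Int} {N M p1 p2 p3 p4 i j k m : Int}
    (hnb : ¬(1 ≤ i ∧ i < j ∧ j ≤ N ∧ 1 ≤ k ∧ k ≤ m ∧ m ≤ M))
    (hb : i = j ∧ 1 ≤ i ∧ i ≤ N ∧ 1 ≤ k ∧ k ≤ PySem.List.pyGetD A i 0 ∧
      PySem.List.pyGetD A i 0 ≤ m ∧ m ≤ M) :
    pvT A N M p1 p2 p3 p4 i j k m = 1 := by
  unfold pvT; rw [if_neg hnb, if_pos hb]

theorem pvT_zero {A : List Int} {N M p1 p2 p3 p4 i j k m : Int}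
    (hnb : ¬(1 ≤ i ∧ i < j ∧ j ≤ N ∧ 1 ≤ k ∧ k ≤ m ∧ m ≤ M))
    (hnb2 : ¬(i = j ∧ 1 ≤ i ∧ i ≤ N ∧ 1 ≤ k ∧ k ≤ PySem.List.pyGetD A i 0 ∧
      PySem.List.pyGetD A i 0 ≤ m ∧ m ≤ M)) :
    pvT A N M p1 p2 p3 p4 i j k m = 0 := by
  unfold pvT; rw [if_neg hnb, if_neg hnb2]

theorem pvT_base_eq {A : List Int} {N M p1 p2 p3 p4 i j k m : Int}
    (hnb : ¬(1 ≤ i ∧ i < j ∧ j ≤ N ∧ 1 ≤ k ∧ k ≤ m ∧ m ≤ M))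
    (hij : i = j) (h1 : 1 ≤ i) (hiN : i ≤ N) (h1k : 1 ≤ k) (hkm : k ≤ m) (hmM : m ≤ M) :
    pvT A N M p1 p2 p3 p4 i j k m = pvLNDS A i j k m := by
  rw [pvLNDS_base A i j k m (show ¬(i > j ∨ k > m) by omega) hij]
  by_cases hd2 : k ≤ PySem.List.pyGetD A i 0 ∧ PySem.List.pyGetD A i 0 ≤ m
  · rw [pvT_base hnb ⟨hij, h1, hiN, h1k, hd2.1, hd2.2, hmM⟩, if_pos hd2]
  · rw [pvT_zero hnb (show ¬(i = j ∧ 1 ≤ i ∧ i ≤ N ∧ 1 ≤ k ∧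
      k ≤ PySem.List.pyGetD A i 0 ∧ PySem.List.pyGetD A i 0 ≤ m ∧ m ≤ M) from
      fun hcon => hd2 ⟨hcon.2.2.2.2.1, hcon.2.2.2.2.2.1⟩), if_neg hd2]

def pvInv (A : List Int) (N M p1 p2 p3 p4 : Int)
    (dp : Array (Array (Array (Array Int)))) : Prop :=
  pvDims (N + 2).toNat (M + 2).toNat dp ∧
  ∀ i j k m : Int, 0 ≤ i → i ≤ N + 1 → 0 ≤ j → j ≤ N + 1 → 0 ≤ k → k ≤ M + 1 →
    0 ≤ m → m ≤ M + 1 → pvGet4 dp i j k m = pvT A N M p1 p2 p3 p4 i j k m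

theorem pvRetarget {A : List Int} {N M p1 p2 p3 p4 q1 q2 q3 q4 : Int}
    {dp : Array (Array (Array (Array Int)))}
    (h : pvInv A N M p1 p2 p3 p4 dp)
    (hiff : ∀ i j k m : Int, 1 ≤ i → i < j → j ≤ N → 1 ≤ k → k ≤ m → m ≤ M →
      (pvLex (j - i + 1) i (m - k + 1) k p1 p2 p3 p4 ↔
       pvLex (j - i + 1) i (m - k + 1) k q1 q2 q3 q4)) :
    pvInv A N M q1 q2 q3 q4 dp := by
  refine ⟨h.1, fun i j k m b1 b2 b3 b4 b5 b6 b7 b8 => ?_⟩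
  rw [h.2 i j k m b1 b2 b3 b4 b5 b6 b7 b8]
  unfold pvT
  by_cases hb : 1 ≤ i ∧ i < j ∧ j ≤ N ∧ 1 ≤ k ∧ k ≤ m ∧ m ≤ M
  · rw [if_pos hb, if_pos hb]
    exact if_congr (hiff i j k m hb.1 hb.2.1 hb.2.2.1 hb.2.2.2.1 hb.2.2.2.2.1 hb.2.2.2.2.2)
      rfl rfl
  · rw [if_neg hb, if_neg hb]

-- ---- the base loops ----

theorem pvBaseR (A : List Int) (N M : Int) (i L : Int) (hN : 0 ≤ N)
    (hi1 : 1 ≤ i) (hiN : i ≤ N) (hL1 : 1 ≤ L) (hLM : L ≤ M) :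
    ∀ n : Nat, ∀ lo : Int, ∀ dp, 0 ≤ lo → (M + 1 - lo).toNat = n →
    pvDims (N + 2).toNat (M + 2).toNat dp →
    pvDims (N + 2).toNat (M + 2).toNat
      ((PySem.List.pyRange lo (M + 1) 1).foldl (fun dp R => pvSet4 dp i i L R 1) dp) ∧
    ∀ i' j' k' m' : Int, 0 ≤ i' → i' ≤ N + 1 → 0 ≤ j' → j' ≤ N + 1 → 0 ≤ k' → k' ≤ M + 1 →
      0 ≤ m' → m' ≤ M + 1 →
      pvGet4 ((PySem.List.pyRange lo (M + 1) 1).foldl (fun dp R => pvSet4 dp i i L R 1) dp)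
          i' j' k' m' =
        if i' = i ∧ j' = i ∧ k' = L ∧ lo ≤ m' ∧ m' ≤ M then 1 else pvGet4 dp i' j' k' m' := by
  intro n
  induction n with
  | zero =>
    intro lo dp hlo hfuel hd
    rw [PySem.List.pyRange_one_eq_nil (show M + 1 ≤ lo by omega), List.foldl_nil]
    refine ⟨hd, fun i' j' k' m' b1 b2 b3 b4 b5 b6 b7 b8 => ?_⟩
    split_ifs <;> omega
  | succ n ih =>
    intro lo dp hlo hfuel hd
    rw [PySem.List.pyRange_one_cons (show lo < M + 1 by omega), List.foldl_cons]
    have hd' := pvDims_pvSet4 hd i i L lo 1 (by omega) (by omega) (by omega) (by omega)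
    obtain ⟨hdr, hvr⟩ := ih (lo + 1) (pvSet4 dp i i L lo 1) (by omega) (by omega) hd'
    refine ⟨hdr, fun i' j' k' m' b1 b2 b3 b4 b5 b6 b7 b8 => ?_⟩
    rw [hvr i' j' k' m' b1 b2 b3 b4 b5 b6 b7 b8,
      pvGet4_pvSet4 hd i i L lo 1 (by omega) (by omega) (by omega) (by omega)]
    split_ifs <;> omega

theorem pvBaseL (A : List Int) (N M : Int) (i : Int) (hN : 0 ≤ N)
    (hi1 : 1 ≤ i) (hiN : i ≤ N) (ha : PySem.List.pyGetD A i 0 ≤ M) :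
    ∀ n : Nat, ∀ lo : Int, ∀ dp, 1 ≤ lo → (PySem.List.pyGetD A i 0 + 1 - lo).toNat = n →
    pvDims (N + 2).toNat (M + 2).toNat dp →
    pvDims (N + 2).toNat (M + 2).toNat
      ((PySem.List.pyRange lo (PySem.List.pyGetD A i 0 + 1) 1).foldl (fun dp L =>
        (PySem.List.pyRange (PySem.List.pyGetD A i 0) (M + 1) 1).foldl (fun dp R =>
          pvSet4 dp i i L R 1) dp) dp) ∧
    ∀ i' j' k' m' : Int, 0 ≤ i' → i' ≤ N + 1 → 0 ≤ j' → j' ≤ N + 1 → 0 ≤ k' → k' ≤ M + 1 →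
      0 ≤ m' → m' ≤ M + 1 →
      pvGet4 ((PySem.List.pyRange lo (PySem.List.pyGetD A i 0 + 1) 1).foldl (fun dp L =>
        (PySem.List.pyRange (PySem.List.pyGetD A i 0) (M + 1) 1).foldl (fun dp R =>
          pvSet4 dp i i L R 1) dp) dp) i' j' k' m' =
        if i' = i ∧ j' = i ∧ lo ≤ k' ∧ k' ≤ PySem.List.pyGetD A i 0 ∧
            PySem.List.pyGetD A i 0 ≤ m' ∧ m' ≤ M then 1 else pvGet4 dp i' j' k' m' := by
  intro n
  induction n with
  | zero =>
    intro lo dp hlo hfuel hd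
    rw [PySem.List.pyRange_one_eq_nil (show PySem.List.pyGetD A i 0 + 1 ≤ lo by omega),
      List.foldl_nil]
    refine ⟨hd, fun i' j' k' m' b1 b2 b3 b4 b5 b6 b7 b8 => ?_⟩
    split_ifs <;> omega
  | succ n ih =>
    intro lo dp hlo hfuel hd
    rw [PySem.List.pyRange_one_cons (show lo < PySem.List.pyGetD A i 0 + 1 by omega),
      List.foldl_cons]
    obtain ⟨hdr, hvr⟩ := pvBaseR A N M i lo hN hi1 hiN hlo (by omega)
      (M + 1 - PySem.List.pyGetD A i 0).toNat (PySem.List.pyGetD A i 0) dp (by omega) rfl hd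
    obtain ⟨hdl, hvl⟩ := ih (lo + 1) _ (by omega) (by omega) hdr
    refine ⟨hdl, fun i' j' k' m' b1 b2 b3 b4 b5 b6 b7 b8 => ?_⟩
    rw [hvl i' j' k' m' b1 b2 b3 b4 b5 b6 b7 b8,
      hvr i' j' k' m' b1 b2 b3 b4 b5 b6 b7 b8]
    split_ifs <;> omega

theorem pvBaseI (A : List Int) (N M : Int) (hN : 0 ≤ N)
    (hMax : ∀ i : Int, 1 ≤ i → i ≤ N → PySem.List.pyGetD A i 0 ≤ M) :
    ∀ n : Nat, ∀ lo : Int, ∀ dp, 1 ≤ lo → (N + 1 - lo).toNat = n →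
    pvDims (N + 2).toNat (M + 2).toNat dp →
    pvDims (N + 2).toNat (M + 2).toNat
      ((PySem.List.pyRange lo (N + 1) 1).foldl (fun dp i =>
        (PySem.List.pyRange 1 (PySem.List.pyGetD A i 0 + 1) 1).foldl (fun dp L =>
          (PySem.List.pyRange (PySem.List.pyGetD A i 0) (M + 1) 1).foldl (fun dp R =>
            pvSet4 dp i i L R 1) dp) dp) dp) ∧
    ∀ i' j' k' m' : Int, 0 ≤ i' → i' ≤ N + 1 → 0 ≤ j' → j' ≤ N + 1 → 0 ≤ k' → k' ≤ M + 1 →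
      0 ≤ m' → m' ≤ M + 1 →
      pvGet4 ((PySem.List.pyRange lo (N + 1) 1).foldl (fun dp i =>
        (PySem.List.pyRange 1 (PySem.List.pyGetD A i 0 + 1) 1).foldl (fun dp L =>
          (PySem.List.pyRange (PySem.List.pyGetD A i 0) (M + 1) 1).foldl (fun dp R =>
            pvSet4 dp i i L R 1) dp) dp) dp) i' j' k' m' =
        if i' = j' ∧ lo ≤ i' ∧ i' ≤ N ∧ 1 ≤ k' ∧ k' ≤ PySem.List.pyGetD A i' 0 ∧
            PySem.List.pyGetD A i' 0 ≤ m' ∧ m' ≤ M then 1 else pvGet4 dp i' j' k' m' := by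
  intro n
  induction n with
  | zero =>
    intro lo dp hlo hfuel hd
    rw [PySem.List.pyRange_one_eq_nil (show N + 1 ≤ lo by omega), List.foldl_nil]
    refine ⟨hd, fun i' j' k' m' b1 b2 b3 b4 b5 b6 b7 b8 => ?_⟩
    split_ifs <;> omega
  | succ n ih =>
    intro lo dp hlo hfuel hd
    rw [PySem.List.pyRange_one_cons (show lo < N + 1 by omega), List.foldl_cons]
    obtain ⟨hdr, hvr⟩ := pvBaseL A N M lo hN hlo (by omega) (hMax lo hlo (by omega))
      (PySem.List.pyGetD A lo 0 + 1 - 1).toNat 1 dp (by omega) rfl hd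
    obtain ⟨hdl, hvl⟩ := ih (lo + 1) _ (by omega) (by omega) hdr
    refine ⟨hdl, fun i' j' k' m' b1 b2 b3 b4 b5 b6 b7 b8 => ?_⟩
    rw [hvl i' j' k' m' b1 b2 b3 b4 b5 b6 b7 b8,
      hvr i' j' k' m' b1 b2 b3 b4 b5 b6 b7 b8]
    by_cases hieq : i' = lo
    · subst hieq
      split_ifs <;> omega
    · split_ifs <;> omega

theorem pvBaseInv (A : List Int) (N M : Int) (hN : 0 ≤ N)
    (hMax : ∀ i : Int, 1 ≤ i → i ≤ N → PySem.List.pyGetD A i 0 ≤ M) :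
    pvInv A N M 2 1 1 1
      ((PySem.List.pyRange 1 (N + 1) 1).foldl (fun dp i =>
        (PySem.List.pyRange 1 (PySem.List.pyGetD A i 0 + 1) 1).foldl (fun dp L =>
          (PySem.List.pyRange (PySem.List.pyGetD A i 0) (M + 1) 1).foldl (fun dp R =>
            pvSet4 dp i i L R 1) dp) dp)
        (Array.replicate (N + 2).toNat (Array.replicate (N + 2).toNat
          (Array.replicate (M + 2).toNat (Array.replicate (M + 2).toNat (0 : Int)))))) := by
  obtain ⟨hd, hv⟩ := pvBaseI A N M hN hMax (N + 1 - 1).toNat 1 _ (by omega) rfl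
    (pvDims_init (N + 2).toNat (M + 2).toNat)
  refine ⟨hd, fun i j k m b1 b2 b3 b4 b5 b6 b7 b8 => ?_⟩
  rw [hv i j k m b1 b2 b3 b4 b5 b6 b7 b8, pvGet4_init]
  by_cases hb : 1 ≤ i ∧ i < j ∧ j ≤ N ∧ 1 ≤ k ∧ k ≤ m ∧ m ≤ M
  · rw [pvT_main0 hb (show ¬ pvLex (j - i + 1) i (m - k + 1) k 2 1 1 1 by unfold pvLex; omega),
      if_neg (show ¬(i = j ∧ 1 ≤ i ∧ i ≤ N ∧ 1 ≤ k ∧ k ≤ PySem.List.pyGetD A i 0 ∧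
        PySem.List.pyGetD A i 0 ≤ m ∧ m ≤ M) from fun hcon => by omega)]
  · unfold pvT
    rw [if_neg hb]

-- ---- the main loops ----

theorem pvStep (A : List Int) (N M len l r span lo R : Int)
    (hr : r = l + len - 1) (hR : R = lo + span - 1)
    (h2 : 2 ≤ len) (hlenN : len ≤ N) (hl1 : 1 ≤ l) (hlmax : l ≤ N - len + 1)
    (hs1 : 1 ≤ span) (hsM : span ≤ M) (ho1 : 1 ≤ lo) (hoM : lo ≤ M - span + 1)
    (dp : Array (Array (Array (Array Int))))
    (h : pvInv A N M len l span lo dp) :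
    pvInv A N M len l span (lo + 1)
      (pvSet4 dp l r lo R
        (let val := pvGet4 dp l r (lo + 1) R
         let val := if pvGet4 dp l r lo (R - 1) > val then pvGet4 dp l r lo (R - 1) else val
         let tmp := pvGet4 dp (l + 1) r lo R + (if PySem.List.pyGetD A l 0 = lo then 1 else 0)
         let val := if tmp > val then tmp else val
         let tmp := pvGet4 dp l (r - 1) lo R + (if PySem.List.pyGetD A r 0 = R then 1 else 0)
         let val := if tmp > val then tmp else val
         let tmp := pvGet4 dp (l + 1) (r - 1) lo R
         let tmp := tmp + (if PySem.List.pyGetD A l 0 = R then 1 else 0)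
         let tmp := tmp + (if PySem.List.pyGetD A r 0 = lo then 1 else 0)
         if tmp > val then tmp else val)) := by
  have e1 : pvGet4 dp l r (lo + 1) R = pvLNDS A l r (lo + 1) R := by
    rw [h.2 l r (lo + 1) R (by omega) (by omega) (by omega) (by omega) (by omega) (by omega)
      (by omega) (by omega)]
    by_cases hsp : lo + 1 ≤ R
    · exact pvT_main ⟨by omega, by omega, by omega, by omega, hsp, by omega⟩
        (by unfold pvLex; omega)
    · rw [pvT_zero (show ¬(1 ≤ l ∧ l < r ∧ r ≤ N ∧ 1 ≤ lo + 1 ∧ lo + 1 ≤ R ∧ R ≤ M) from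
          fun hcon => hsp hcon.2.2.2.2.1)
        (show ¬(l = r ∧ 1 ≤ l ∧ l ≤ N ∧ 1 ≤ lo + 1 ∧ lo + 1 ≤ PySem.List.pyGetD A l 0 ∧
          PySem.List.pyGetD A l 0 ≤ R ∧ R ≤ M) from fun hcon => by omega),
        pvLNDS_zero A l r (lo + 1) R (by omega)]
  have e2 : pvGet4 dp l r lo (R - 1) = pvLNDS A l r lo (R - 1) := by
    rw [h.2 l r lo (R - 1) (by omega) (by omega) (by omega) (by omega) (by omega) (by omega)
      (by omega) (by omega)]
    by_cases hsp : lo ≤ R - 1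
    · exact pvT_main ⟨by omega, by omega, by omega, by omega, hsp, by omega⟩
        (by unfold pvLex; omega)
    · rw [pvT_zero (show ¬(1 ≤ l ∧ l < r ∧ r ≤ N ∧ 1 ≤ lo ∧ lo ≤ R - 1 ∧ R - 1 ≤ M) from
          fun hcon => hsp hcon.2.2.2.2.1)
        (show ¬(l = r ∧ 1 ≤ l ∧ l ≤ N ∧ 1 ≤ lo ∧ lo ≤ PySem.List.pyGetD A l 0 ∧
          PySem.List.pyGetD A l 0 ≤ R - 1 ∧ R - 1 ≤ M) from fun hcon => by omega),
        pvLNDS_zero A l r lo (R - 1) (by omega)]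
  have e3 : pvGet4 dp (l + 1) r lo R = pvLNDS A (l + 1) r lo R := by
    rw [h.2 (l + 1) r lo R (by omega) (by omega) (by omega) (by omega) (by omega) (by omega)
      (by omega) (by omega)]
    by_cases hc : l + 1 < r
    · exact pvT_main ⟨by omega, hc, by omega, by omega, by omega, by omega⟩
        (by unfold pvLex; omega)
    · exact pvT_base_eq (show ¬(1 ≤ l + 1 ∧ l + 1 < r ∧ r ≤ N ∧ 1 ≤ lo ∧ lo ≤ R ∧ R ≤ M) from
        fun hcon => hc hcon.2.1) (by omega) (by omega) (by omega) (by omega) (by omega)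
        (by omega)
  have e4 : pvGet4 dp l (r - 1) lo R = pvLNDS A l (r - 1) lo R := by
    rw [h.2 l (r - 1) lo R (by omega) (by omega) (by omega) (by omega) (by omega) (by omega)
      (by omega) (by omega)]
    by_cases hc : l < r - 1
    · exact pvT_main ⟨by omega, hc, by omega, by omega, by omega, by omega⟩
        (by unfold pvLex; omega)
    · exact pvT_base_eq (show ¬(1 ≤ l ∧ l < r - 1 ∧ r - 1 ≤ N ∧ 1 ≤ lo ∧ lo ≤ R ∧ R ≤ M) from
        fun hcon => hc hcon.2.1) (by omega) (by omega) (by omega) (by omega) (by omega)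
        (by omega)
  have e5 : pvGet4 dp (l + 1) (r - 1) lo R = pvLNDS A (l + 1) (r - 1) lo R := by
    rw [h.2 (l + 1) (r - 1) lo R (by omega) (by omega) (by omega) (by omega) (by omega)
      (by omega) (by omega) (by omega)]
    by_cases hc : l + 1 < r - 1
    · exact pvT_main ⟨by omega, hc, by omega, by omega, by omega, by omega⟩
        (by unfold pvLex; omega)
    · by_cases hc2 : l + 1 = r - 1
      · exact pvT_base_eq
          (show ¬(1 ≤ l + 1 ∧ l + 1 < r - 1 ∧ r - 1 ≤ N ∧ 1 ≤ lo ∧ lo ≤ R ∧ R ≤ M) from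
            fun hcon => hc hcon.2.1) hc2 (by omega) (by omega) (by omega) (by omega) (by omega)
      · rw [pvT_zero
          (show ¬(1 ≤ l + 1 ∧ l + 1 < r - 1 ∧ r - 1 ≤ N ∧ 1 ≤ lo ∧ lo ≤ R ∧ R ≤ M) from
            fun hcon => hc hcon.2.1)
          (show ¬(l + 1 = r - 1 ∧ 1 ≤ l + 1 ∧ l + 1 ≤ N ∧ 1 ≤ lo ∧
            lo ≤ PySem.List.pyGetD A (l + 1) 0 ∧ PySem.List.pyGetD A (l + 1) 0 ≤ R ∧ R ≤ M)
            from fun hcon => hc2 hcon.1),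
          pvLNDS_zero A (l + 1) (r - 1) lo R (by omega)]
  refine ⟨pvDims_pvSet4 h.1 l r lo R _ (by omega) (by omega) (by omega) (by omega),
    fun i j k m b1 b2 b3 b4 b5 b6 b7 b8 => ?_⟩
  rw [pvGet4_pvSet4 h.1 l r lo R _ (by omega) (by omega) (by omega) (by omega) i j k m]
  by_cases hw : i = l ∧ j = r ∧ k = lo ∧ m = R
  · rw [if_pos (show i.toNat = l.toNat ∧ j.toNat = r.toNat ∧ k.toNat = lo.toNat ∧
      m.toNat = R.toNat by omega)]
    obtain ⟨hwi, hwj, hwk, hwm⟩ := hw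
    subst hwi; subst hwj; subst hwk; subst hwm
    rw [show pvT A N M len i span (k + 1) i j k m = pvLNDS A i j k m from
      pvT_main ⟨by omega, by omega, by omega, by omega, by omega, by omega⟩
        (by unfold pvLex; omega)]
    rw [show
      (let val := pvGet4 dp i j (k + 1) m
       let val := if pvGet4 dp i j k (m - 1) > val then pvGet4 dp i j k (m - 1) else val
       let tmp := pvGet4 dp (i + 1) j k m + (if PySem.List.pyGetD A i 0 = k then 1 else 0)
       let val := if tmp > val then tmp else val
       let tmp := pvGet4 dp i (j - 1) k m + (if PySem.List.pyGetD A j 0 = m then 1 else 0)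
       let val := if tmp > val then tmp else val
       let tmp := pvGet4 dp (i + 1) (j - 1) k m
       let tmp := tmp + (if PySem.List.pyGetD A i 0 = m then 1 else 0)
       let tmp := tmp + (if PySem.List.pyGetD A j 0 = k then 1 else 0)
       if tmp > val then tmp else val) =
      max (max (max (max (pvGet4 dp i j (k + 1) m) (pvGet4 dp i j k (m - 1)))
        (pvGet4 dp (i + 1) j k m + (if PySem.List.pyGetD A i 0 = k then 1 else 0)))
        (pvGet4 dp i (j - 1) k m + (if PySem.List.pyGetD A j 0 = m then 1 else 0)))
        (pvGet4 dp (i + 1) (j - 1) k m + (if PySem.List.pyGetD A i 0 = m then 1 else 0)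
              + (if PySem.List.pyGetD A j 0 = k then 1 else 0))
      from pvChainMax _ _ _ _ _]
    rw [e1, e2, e3, e4, e5]
    exact (pvLNDS_step A i j k m (by omega) (by omega)).symm
  · rw [if_neg (show ¬(i.toNat = l.toNat ∧ j.toNat = r.toNat ∧ k.toNat = lo.toNat ∧
      m.toNat = R.toNat) by omega), h.2 i j k m b1 b2 b3 b4 b5 b6 b7 b8]
    by_cases hb : 1 ≤ i ∧ i < j ∧ j ≤ N ∧ 1 ≤ k ∧ k ≤ m ∧ m ≤ M
    · unfold pvT
      rw [if_pos hb, if_pos hb]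
      exact if_congr (show pvLex (j - i + 1) i (m - k + 1) k len l span lo ↔
        pvLex (j - i + 1) i (m - k + 1) k len l span (lo + 1) by unfold pvLex; omega) rfl rfl
    · unfold pvT
      rw [if_neg hb, if_neg hb]

theorem pvLoopL (A : List Int) (N M len l r span : Int) (hr : r = l + len - 1)
    (h2 : 2 ≤ len) (hlenN : len ≤ N) (hl1 : 1 ≤ l) (hlmax : l ≤ N - len + 1)
    (hs1 : 1 ≤ span) (hsM : span ≤ M) :
    ∀ n : Nat, ∀ lo : Int, ∀ dp, 1 ≤ lo → (M - span + 2 - lo).toNat = n →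
    pvInv A N M len l span lo dp →
    pvInv A N M len l span (M - span + 2)
      ((PySem.List.pyRange lo (M - span + 2) 1).foldl (fun dp L =>
        let R := L + span - 1
        let val := pvGet4 dp l r (L + 1) R
        let val := if pvGet4 dp l r L (R - 1) > val then pvGet4 dp l r L (R - 1) else val
        let tmp := pvGet4 dp (l + 1) r L R + (if PySem.List.pyGetD A l 0 = L then 1 else 0)
        let val := if tmp > val then tmp else val
        let tmp := pvGet4 dp l (r - 1) L R + (if PySem.List.pyGetD A r 0 = R then 1 else 0)
        let val := if tmp > val then tmp else val
        let tmp := pvGet4 dp (l + 1) (r - 1) L R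
        let tmp := tmp + (if PySem.List.pyGetD A l 0 = R then 1 else 0)
        let tmp := tmp + (if PySem.List.pyGetD A r 0 = L then 1 else 0)
        let val := if tmp > val then tmp else val
        pvSet4 dp l r L R val) dp) := by
  intro n
  induction n with
  | zero =>
    intro lo dp hlo hfuel h
    rw [PySem.List.pyRange_one_eq_nil (show M - span + 2 ≤ lo by omega), List.foldl_nil]
    exact pvRetarget h (fun i j k m c1 c2 c3 c4 c5 c6 => by unfold pvLex; omega)
  | succ n ih =>
    intro lo dp hlo hfuel h
    rw [PySem.List.pyRange_one_cons (show lo < M - span + 2 by omega), List.foldl_cons]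
    exact ih (lo + 1) _ (by omega) (by omega)
      (pvStep A N M len l r span lo (lo + span - 1) hr rfl h2 hlenN hl1 hlmax hs1 hsM hlo
        (by omega) dp h)

theorem pvLoopS (A : List Int) (N M len l r : Int) (hr : r = l + len - 1)
    (h2 : 2 ≤ len) (hlenN : len ≤ N) (hl1 : 1 ≤ l) (hlmax : l ≤ N - len + 1) :
    ∀ n : Nat, ∀ so : Int, ∀ dp, 1 ≤ so → (M + 1 - so).toNat = n →
    pvInv A N M len l so 1 dp →
    pvInv A N M len l (M + 1) 1
      ((PySem.List.pyRange so (M + 1) 1).foldl (fun dp span =>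
        (PySem.List.pyRange 1 (M - span + 2) 1).foldl (fun dp L =>
          let R := L + span - 1
          let val := pvGet4 dp l r (L + 1) R
          let val := if pvGet4 dp l r L (R - 1) > val then pvGet4 dp l r L (R - 1) else val
          let tmp := pvGet4 dp (l + 1) r L R + (if PySem.List.pyGetD A l 0 = L then 1 else 0)
          let val := if tmp > val then tmp else val
          let tmp := pvGet4 dp l (r - 1) L R + (if PySem.List.pyGetD A r 0 = R then 1 else 0)
          let val := if tmp > val then tmp else val
          let tmp := pvGet4 dp (l + 1) (r - 1) L R
          let tmp := tmp + (if PySem.List.pyGetD A l 0 = R then 1 else 0)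
          let tmp := tmp + (if PySem.List.pyGetD A r 0 = L then 1 else 0)
          let val := if tmp > val then tmp else val
          pvSet4 dp l r L R val) dp) dp) := by
  intro n
  induction n with
  | zero =>
    intro so dp hso hfuel h
    rw [PySem.List.pyRange_one_eq_nil (show M + 1 ≤ so by omega), List.foldl_nil]
    exact pvRetarget h (fun i j k m c1 c2 c3 c4 c5 c6 => by unfold pvLex; omega)
  | succ n ih =>
    intro so dp hso hfuel h
    rw [PySem.List.pyRange_one_cons (show so < M + 1 by omega), List.foldl_cons]
    refine ih (so + 1) _ (by omega) (by omega) ?_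
    refine pvRetarget (pvLoopL A N M len l r so hr h2 hlenN hl1 hlmax hso (by omega)
      (M - so + 2 - 1).toNat 1 dp (by omega) rfl h)
      (fun i j k m c1 c2 c3 c4 c5 c6 => by unfold pvLex; omega)

theorem pvLoopl (A : List Int) (N M len : Int)
    (h2 : 2 ≤ len) (hlenN : len ≤ N) :
    ∀ n : Nat, ∀ lo : Int, ∀ dp, 1 ≤ lo → (N - len + 2 - lo).toNat = n →
    pvInv A N M len lo 1 1 dp →
    pvInv A N M len (N - len + 2) 1 1
      ((PySem.List.pyRange lo (N - len + 2) 1).foldl (fun dp l =>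
        let r := l + len - 1
        (PySem.List.pyRange 1 (M + 1) 1).foldl (fun dp span =>
          (PySem.List.pyRange 1 (M - span + 2) 1).foldl (fun dp L =>
            let R := L + span - 1
            let val := pvGet4 dp l r (L + 1) R
            let val := if pvGet4 dp l r L (R - 1) > val then pvGet4 dp l r L (R - 1) else val
            let tmp := pvGet4 dp (l + 1) r L R + (if PySem.List.pyGetD A l 0 = L then 1 else 0)
            let val := if tmp > val then tmp else val
            let tmp := pvGet4 dp l (r - 1) L R + (if PySem.List.pyGetD A r 0 = R then 1 else 0)
            let val := if tmp > val then tmp else val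
            let tmp := pvGet4 dp (l + 1) (r - 1) L R
            let tmp := tmp + (if PySem.List.pyGetD A l 0 = R then 1 else 0)
            let tmp := tmp + (if PySem.List.pyGetD A r 0 = L then 1 else 0)
            let val := if tmp > val then tmp else val
            pvSet4 dp l r L R val) dp) dp) dp) := by
  intro n
  induction n with
  | zero =>
    intro lo dp hlo hfuel h
    rw [PySem.List.pyRange_one_eq_nil (show N - len + 2 ≤ lo by omega), List.foldl_nil]
    exact pvRetarget h (fun i j k m c1 c2 c3 c4 c5 c6 => by unfold pvLex; omega)
  | succ n ih =>
    intro lo dp hlo hfuel h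
    rw [PySem.List.pyRange_one_cons (show lo < N - len + 2 by omega), List.foldl_cons]
    refine ih (lo + 1) _ (by omega) (by omega) ?_
    refine pvRetarget (pvLoopS A N M len lo (lo + len - 1) rfl h2 hlenN hlo (by omega)
      (M + 1 - 1).toNat 1 _ (by omega) rfl h)
      (fun i j k m c1 c2 c3 c4 c5 c6 => by unfold pvLex; omega)

theorem pvLoopLen (A : List Int) (N M : Int) (hN : 0 ≤ N) :
    ∀ n : Nat, ∀ lo : Int, ∀ dp, 2 ≤ lo → (N + 1 - lo).toNat = n →
    pvInv A N M lo 1 1 1 dp →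
    pvInv A N M (N + 1) 1 1 1
      ((PySem.List.pyRange lo (N + 1) 1).foldl (fun dp length =>
        (PySem.List.pyRange 1 (N - length + 2) 1).foldl (fun dp l =>
          let r := l + length - 1
          (PySem.List.pyRange 1 (M + 1) 1).foldl (fun dp span =>
            (PySem.List.pyRange 1 (M - span + 2) 1).foldl (fun dp L =>
              let R := L + span - 1
              let val := pvGet4 dp l r (L + 1) R
              let val := if pvGet4 dp l r L (R - 1) > val then pvGet4 dp l r L (R - 1) else val
              let tmp := pvGet4 dp (l + 1) r L R +
                (if PySem.List.pyGetD A l 0 = L then 1 else 0)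
              let val := if tmp > val then tmp else val
              let tmp := pvGet4 dp l (r - 1) L R +
                (if PySem.List.pyGetD A r 0 = R then 1 else 0)
              let val := if tmp > val then tmp else val
              let tmp := pvGet4 dp (l + 1) (r - 1) L R
              let tmp := tmp + (if PySem.List.pyGetD A l 0 = R then 1 else 0)
              let tmp := tmp + (if PySem.List.pyGetD A r 0 = L then 1 else 0)
              let val := if tmp > val then tmp else val
              pvSet4 dp l r L R val) dp) dp) dp) dp) := by
  intro n
  induction n with
  | zero =>
    intro lo dp hlo hfuel h
    rw [PySem.List.pyRange_one_eq_nil (show N + 1 ≤ lo by omega), List.foldl_nil]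
    exact pvRetarget h (fun i j k m c1 c2 c3 c4 c5 c6 => by unfold pvLex; omega)
  | succ n ih =>
    intro lo dp hlo hfuel h
    rw [PySem.List.pyRange_one_cons (show lo < N + 1 by omega), List.foldl_cons]
    refine ih (lo + 1) _ (by omega) (by omega) ?_
    refine pvRetarget (pvLoopl A N M lo hlo (by omega)
      (N - lo + 2 - 1).toNat 1 _ (by omega) rfl h)
      (fun i j k m c1 c2 c3 c4 c5 c6 => by unfold pvLex; omega)

-- ---- assembling the A side ----

theorem pvA_eq (arr : List Int) :
    compute_reference_answer_py arr =
      pvLNDS ((0 : Int) :: arr) 1 (arr.length : Int) 1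
        ((PySem.List.max? ((0 : Int) :: arr) (fun x => x)).getD 0) := by
  obtain ⟨m0, hmx⟩ : ∃ m0, PySem.List.max? ((0 : Int) :: arr) (fun x => x) = some m0 := by
    cases hh : PySem.List.max? ((0 : Int) :: arr) (fun x => x) with
    | none => exact absurd ((PySem.List.max?_eq_none_iff _ _).1 hh) (by simp)
    | some m => exact ⟨m, rfl⟩
  have hM0 : 0 ≤ (PySem.List.max? ((0 : Int) :: arr) (fun x => x)).getD 0 := by
    rw [hmx, Option.getD_some]
    exact PySem.List.max?_isMax hmx 0 (by simp)
  have hN : 0 ≤ (arr.length : Int) := Int.natCast_nonneg arr.length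
  have hMax : ∀ i : Int, 1 ≤ i → i ≤ (arr.length : Int) →
      PySem.List.pyGetD ((0 : Int) :: arr) i 0 ≤
        (PySem.List.max? ((0 : Int) :: arr) (fun x => x)).getD 0 := by
    intro i h1 h2
    rw [hmx, Option.getD_some]
    refine PySem.List.max?_isMax hmx _ (PySem.List.pyGetD_mem _ _ ?_)
    simp only [PySem.Raise.InRange, List.length_cons]
    push_cast
    omega
  have hinv := pvLoopLen ((0 : Int) :: arr) (arr.length : Int)
    ((PySem.List.max? ((0 : Int) :: arr) (fun x => x)).getD 0) hN
    (((arr.length : Int) + 1 - 2)).toNat 2 _ (by omega) rfl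
    (pvBaseInv ((0 : Int) :: arr) (arr.length : Int)
      ((PySem.List.max? ((0 : Int) :: arr) (fun x => x)).getD 0) hN hMax)
  calc compute_reference_answer_py arr
      = pvT ((0 : Int) :: arr) (arr.length : Int)
          ((PySem.List.max? ((0 : Int) :: arr) (fun x => x)).getD 0)
          ((arr.length : Int) + 1) 1 1 1 1 (arr.length : Int) 1
          ((PySem.List.max? ((0 : Int) :: arr) (fun x => x)).getD 0) := by
        exact hinv.2 1 (arr.length : Int) 1
          ((PySem.List.max? ((0 : Int) :: arr) (fun x => x)).getD 0)
          (by omega) (by omega) (by omega) (by omega) (by omega) (by omega) (by omega) (by omega)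
    _ = pvLNDS ((0 : Int) :: arr) 1 (arr.length : Int) 1
          ((PySem.List.max? ((0 : Int) :: arr) (fun x => x)).getD 0) := by
        by_cases hb : 1 ≤ (1 : Int) ∧ (1 : Int) < (arr.length : Int) ∧
            (arr.length : Int) ≤ (arr.length : Int) ∧ 1 ≤ (1 : Int) ∧
            (1 : Int) ≤ (PySem.List.max? ((0 : Int) :: arr) (fun x => x)).getD 0 ∧
            (PySem.List.max? ((0 : Int) :: arr) (fun x => x)).getD 0 ≤
              (PySem.List.max? ((0 : Int) :: arr) (fun x => x)).getD 0
        · exact pvT_main hb (by unfold pvLex; omega)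
        · by_cases hb2 : (1 : Int) = (arr.length : Int) ∧ 1 ≤ (1 : Int) ∧
              (1 : Int) ≤ (arr.length : Int) ∧ 1 ≤ (1 : Int) ∧
              1 ≤ PySem.List.pyGetD ((0 : Int) :: arr) 1 0 ∧
              PySem.List.pyGetD ((0 : Int) :: arr) 1 0 ≤
                (PySem.List.max? ((0 : Int) :: arr) (fun x => x)).getD 0 ∧
              (PySem.List.max? ((0 : Int) :: arr) (fun x => x)).getD 0 ≤
                (PySem.List.max? ((0 : Int) :: arr) (fun x => x)).getD 0
          · rw [pvT_base hb hb2,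
              pvLNDS_base _ 1 _ 1 _ (by omega) hb2.1,
              if_pos (show (1 : Int) ≤ PySem.List.pyGetD ((0 : Int) :: arr) 1 0 ∧
                PySem.List.pyGetD ((0 : Int) :: arr) 1 0 ≤
                  (PySem.List.max? ((0 : Int) :: arr) (fun x => x)).getD 0 from
                ⟨hb2.2.2.2.2.1, hb2.2.2.2.2.2.1⟩)]
          · by_cases hz : (1 : Int) > (arr.length : Int) ∨
                (1 : Int) > (PySem.List.max? ((0 : Int) :: arr) (fun x => x)).getD 0
            · rw [pvT_zero hb hb2, pvLNDS_zero _ 1 _ 1 _ hz]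
            · have hgm := hMax 1 (by omega) (by omega)
              rw [pvT_zero hb hb2,
                pvLNDS_base _ 1 _ 1 _ (by omega) (show (1 : Int) = (arr.length : Int) by omega),
                if_neg (show ¬((1 : Int) ≤ PySem.List.pyGetD ((0 : Int) :: arr) 1 0 ∧
                  PySem.List.pyGetD ((0 : Int) :: arr) 1 0 ≤
                    (PySem.List.max? ((0 : Int) :: arr) (fun x => x)).getD 0) by omega)]

-- ---- the B side: the memoised recursion computes pvLNDS ----

def pvCacheOK (A : List Int) (cache : Std.HashMap (Int × Int × Int × Int) Int) : Prop :=
  ∀ (q : Int × Int × Int × Int) (v : Int),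
    cache[q]? = some v → v = pvLNDS A q.1 q.2.1 q.2.2.1 q.2.2.2

theorem pvCacheOK_insert (A : List Int) (cache : Std.HashMap (Int × Int × Int × Int) Int)
    (hc : pvCacheOK A cache) (q : Int × Int × Int × Int) (v : Int)
    (hv : v = pvLNDS A q.1 q.2.1 q.2.2.1 q.2.2.2) : pvCacheOK A (cache.insert q v) := by
  intro q' v' h
  rw [Std.HashMap.getElem?_insert] at h
  by_cases he : q = q'
  · subst he
    rw [if_pos (by simp)] at h
    cases h
    exact hv
  · rw [if_neg (by simp [he])] at h
    exact hc q' v' h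

theorem pvSolve_correct (A : List Int) :
    ∀ fuel : Nat, ∀ l r L R : Int, ((r - l) + (R - L)).toNat < fuel ∨ l > r ∨ L > R →
    ∀ cache, pvCacheOK A cache →
      (pvSolve A fuel l r L R cache).1 = pvLNDS A l r L R ∧
      pvCacheOK A (pvSolve A fuel l r L R cache).2 := by
  intro fuel
  induction fuel with
  | zero =>
    intro l r L R hm cache hc
    have hz : l > r ∨ L > R := by omega
    rw [pvSolve, if_pos hz]
    exact ⟨(pvLNDS_zero A l r L R hz).symm, hc⟩
  | succ n ih =>
    intro l r L R hm cache hc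
    by_cases hz : l > r ∨ L > R
    · rw [pvSolve, if_pos hz]
      exact ⟨(pvLNDS_zero A l r L R hz).symm, hc⟩
    · cases hq : cache[(l, r, L, R)]? with
      | some v =>
        rw [pvSolve, if_neg hz]
        simp only [hq]
        exact ⟨hc (l, r, L, R) v hq, hc⟩
      | none =>
        rw [pvSolve, if_neg hz]
        simp only [hq]
        by_cases hlr : l = r
        · rw [if_pos hlr]
          exact ⟨(pvLNDS_base A l r L R hz hlr).symm,
            pvCacheOK_insert A cache hc (l, r, L, R) _ ((pvLNDS_base A l r L R hz hlr).symm)⟩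
        · rw [if_neg hlr]
          have H1 := ih l r (L + 1) R (by omega) cache hc
          have H2 := ih l r L (R - 1) (by omega) (pvSolve A n l r (L + 1) R cache).2 H1.2
          have H3 := ih (l + 1) r L R (by omega)
            (pvSolve A n l r L (R - 1) (pvSolve A n l r (L + 1) R cache).2).2 H2.2
          have H4 := ih l (r - 1) L R (by omega)
            (pvSolve A n (l + 1) r L R
              (pvSolve A n l r L (R - 1) (pvSolve A n l r (L + 1) R cache).2).2).2 H3.2
          have H5 := ih (l + 1) (r - 1) L R (by omega)
            (pvSolve A n l (r - 1) L R
              (pvSolve A n (l + 1) r L R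
                (pvSolve A n l r L (R - 1) (pvSolve A n l r (L + 1) R cache).2).2).2).2 H4.2
          constructor
          · simp only [H1.1, H2.1, H3.1, H4.1, H5.1]
            exact (pvLNDS_step A l r L R hz hlr).symm
          · refine pvCacheOK_insert A _ H5.2 (l, r, L, R) _ ?_
            simp only [H1.1, H2.1, H3.1, H4.1, H5.1]
            exact (pvLNDS_step A l r L R hz hlr).symm

theorem pvAlt_eq (arr : List Int) :
    compute_reference_answer_py_alt arr =
      pvLNDS ((0 : Int) :: arr) 1 (arr.length : Int) 1
        ((PySem.List.max? ((0 : Int) :: arr) (fun x => x)).getD 0) := by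
  have h := pvSolve_correct ((0 : Int) :: arr)
    (((((arr.length : Int)) - 1) +
      ((((PySem.List.max? ((0 : Int) :: arr) (fun x => x)).getD 0)) - 1)).toNat + 1)
    1 (arr.length : Int) 1 ((PySem.List.max? ((0 : Int) :: arr) (fun x => x)).getD 0)
    (Or.inl (by omega)) (∅ : Std.HashMap (Int × Int × Int × Int) Int)
    (fun (q : Int × Int × Int × Int) (v : Int) hqv => by simp at hqv)
  exact h.1

-- ===== VERDICT (by name: the statement is the Claim_ definition above) =====
theorem compute_reference_answer_py_spec : Claim_equal_compute_reference_answer_py := by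
  intro arr hdom
  unfold Spec_compute_reference_answer_py
  rw [pvA_eq arr, pvAlt_eq arr]
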